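-- pv_equiv track=rewrite | github.com/Clifong/Understanding-intutition-in-leetcoding | 1829. Maximum XOR for Each Query/code1.py | getMaximumXor
-- ===== SOURCE A (Python) =====
-- from typing import List
--
-- def getMaximumXor(nums: List[int], maximumBit: int) -> List[int]:
--
--     #Prefix formation
--     arr = [nums[0]]
--     for i in range(1, len(nums)):
--         arr.append(arr[-1] ^ nums[i])
--
--     ans = []
--     counter = len(arr) - 1
--     while counter >= 0:
--         ans.append((2**maximumBit - 1) ^ arr[counter])
--         counter -= 1
--     return ans
-- ===== SOURCE B (Python) =====
-- from typing import List
--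
-- def getMaximumXor(nums: List[int], maximumBit: int) -> List[int]:
--     # Single backward pass with a scalar running XOR instead of a prefix array.
--     total = nums[0]
--     for x in nums[1:]:
--         total ^= x
--     mask = (1 << maximumBit) - 1
--     ans = []
--     for i in range(len(nums) - 1, -1, -1):
--         ans.append(mask ^ total)
--         total ^= nums[i]
--     return ans
-- ===== Notes on version B (the rewrite author's own statement) =====
-- stated objective: alternative
-- what changed: B keeps no prefix array: it computes the total XOR once, then emits answers in a single backward pass while peeling each trailing element off a scalar running XOR, instead of A's build-a-prefix-list pass followed by a separate backward indexed read of that list.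
import Mathlib
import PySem

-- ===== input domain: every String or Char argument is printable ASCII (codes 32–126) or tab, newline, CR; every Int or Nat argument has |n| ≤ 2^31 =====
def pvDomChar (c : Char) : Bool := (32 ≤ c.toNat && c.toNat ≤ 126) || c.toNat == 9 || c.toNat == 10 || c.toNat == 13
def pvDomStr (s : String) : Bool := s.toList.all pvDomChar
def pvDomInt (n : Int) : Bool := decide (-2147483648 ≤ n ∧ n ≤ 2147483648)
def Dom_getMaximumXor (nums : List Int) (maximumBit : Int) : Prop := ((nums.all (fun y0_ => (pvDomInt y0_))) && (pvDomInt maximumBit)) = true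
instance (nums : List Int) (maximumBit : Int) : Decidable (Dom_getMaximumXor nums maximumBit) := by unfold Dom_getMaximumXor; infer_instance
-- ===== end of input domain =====

-- B replaces A's stored prefix-XOR array by a scalar running XOR that is peeled backwards in a single emission pass (objective: alternative decomposition; return-value equivalence on nonempty nums with maximumBit ≥ 0).


-- ===== PORT A =====
-- the 'while counter >= 0' emission loop of A, recursing on counter+1
def pvLoopA (maximumBit : Int) (arr : List Int) : Nat → List Int
  | 0 => []
  | k+1 => PySem.Int.bxor ((2:Int) ^ maximumBit.toNat - 1) (PySem.List.pyGetD arr (k : Int) 0)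
             :: pvLoopA maximumBit arr k

-- prefix formation ('arr' of A); pyGetD's default is only reached where Python raises, outside Pre_
def pvArrA (nums : List Int) : List Int :=
  (PySem.List.pyRange 1 (nums.length : Int) 1).foldl
    (fun arr i => arr ++ [PySem.Int.bxor (arr.getLast?.getD 0) (PySem.List.pyGetD nums i 0)])
    [PySem.List.pyGetD nums 0 0]

def getMaximumXor (nums : List Int) (maximumBit : Int) : List Int :=
  pvLoopA maximumBit (pvArrA nums) (pvArrA nums).length

-- ===== PORT B =====
-- B's backward emission loop: emit mask ^ total, then peel nums[i] off total
def pvLoopB (mask : Int) (nums : List Int) : Nat → Int → List Int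
  | 0, _ => []
  | k+1, total => PySem.Int.bxor mask total
                    :: pvLoopB mask nums k (PySem.Int.bxor total (PySem.List.pyGetD nums (k : Int) 0))

def getMaximumXor_alt (nums : List Int) (maximumBit : Int) : List Int :=
  pvLoopB ((1:Int) <<< maximumBit.toNat - 1) nums nums.length
    ((PySem.List.slice nums (some 1) none).foldl PySem.Int.bxor (PySem.List.pyGetD nums 0 0))

-- ===== PRECONDITION & SPEC =====
-- Pre_ excludes exactly the inputs where the Python A raises: nums = [] (IndexError at nums[0])
-- and maximumBit < 0 (2**maximumBit is a float, so '^' raises TypeError).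
def Pre_getMaximumXor (nums : List Int) (maximumBit : Int) : Prop := nums ≠ [] ∧ 0 ≤ maximumBit
instance (nums : List Int) (maximumBit : Int) : Decidable (Pre_getMaximumXor nums maximumBit) := by unfold Pre_getMaximumXor; infer_instance
def pvWitness_getMaximumXor : List Int × Int := ([0, 1, 1, 3], 2)

def Spec_getMaximumXor (nums : List Int) (maximumBit : Int) (out : List Int) : Prop := out = getMaximumXor_alt nums maximumBit
instance (nums : List Int) (maximumBit : Int) (out : List Int) : Decidable (Spec_getMaximumXor nums maximumBit out) := by unfold Spec_getMaximumXor; infer_instance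

-- ===== CLAIM (what is proved, stated in full; the proofs are below) =====
def Claim_equal_getMaximumXor : Prop := ∀ (nums : List Int) (maximumBit : Int), Dom_getMaximumXor nums maximumBit → Pre_getMaximumXor nums maximumBit → Spec_getMaximumXor nums maximumBit (getMaximumXor nums maximumBit)

-- ===== LEMMAS AND PROOFS =====

-- prefix XOR of nums[0..k] (inclusive)
def pvPref (nums : List Int) (k : Nat) : Int := (nums.take (k+1)).foldl PySem.Int.bxor 0

theorem pvBxor_cancel (a b : Int) : PySem.Int.bxor (PySem.Int.bxor a b) b = a := by
  by_cases ha : 0 ≤ a <;> by_cases hb : 0 ≤ b <;>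
    simp only [PySem.Int.bxor, ha, hb, if_true, if_false] <;>
    split_ifs <;>
    simp_all [Nat.xor_xor_cancel_right] <;>
    omega

theorem pvBxor_zero_left (a : Int) : PySem.Int.bxor 0 a = a := by
  rw [PySem.Int.bxor_comm]; simp [pysem]

theorem pvPref_succ (nums : List Int) (k : Nat) (h : k + 1 < nums.length) :
    pvPref nums (k+1) = PySem.Int.bxor (pvPref nums k) (nums.getD (k+1) 0) := by
  unfold pvPref
  rw [List.take_add_one, List.foldl_append]
  have : nums[k+1]? = some (nums.getD (k+1) 0) := by
    rw [List.getD_eq_getElem _ _ h]; exact List.getElem?_eq_getElem h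
  rw [this]
  simp only [Option.toList_some, List.foldl_cons, List.foldl_nil]

theorem pvPref_zero (x : Int) (t : List Int) : pvPref (x :: t) 0 = x := by
  simp [pvPref, pvBxor_zero_left]

theorem pvLastMapRange (f : Nat → Int) (n : Nat) (h : 0 < n) :
    (((List.range n).map f).getLast? ).getD 0 = f (n - 1) := by
  obtain ⟨m, rfl⟩ : ∃ m, n = m + 1 := ⟨n - 1, by omega⟩
  rw [List.range_succ]
  simp

-- the prefix-formation fold of A builds exactly the table of pvPref values
theorem pvArr_eq (nums : List Int) (hne : nums ≠ []) (n : Nat) (h1 : 1 ≤ n) (hn : n ≤ nums.length) :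
    (PySem.List.pyRange 1 (n : Int) 1).foldl
      (fun arr i => arr ++ [PySem.Int.bxor (arr.getLast?.getD 0) (PySem.List.pyGetD nums i 0)])
      [PySem.List.pyGetD nums 0 0]
    = (List.range n).map (pvPref nums) := by
  induction n with
  | zero => omega
  | succ m ih =>
    by_cases hm : m = 0
    · subst hm
      obtain ⟨x, t, rfl⟩ : ∃ x t, nums = x :: t := by
        cases nums with
        | nil => exact absurd rfl hne
        | cons x t => exact ⟨x, t, rfl⟩
      have h0 : PySem.List.pyRange 1 ((1:Nat) : Int) 1 = [] := by decide
      rw [h0]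
      simp only [List.foldl_nil, List.range_succ, List.range_zero, List.nil_append, List.map_cons, List.map_nil]
      rw [show ((0:Int)) = ((0:Nat):Int) from rfl, PySem.List.pyGetD_natCast, pvPref_zero]
      simp
    · have hm1 : 1 ≤ m := by omega
      have hcast : ((m + 1 : Nat) : Int) = (m : Int) + 1 := by push_cast; ring
      rw [hcast, PySem.List.pyRange_one_succ_right (by exact_mod_cast hm1),
          List.foldl_append, ih hm1 (by omega)]
      simp only [List.foldl_cons, List.foldl_nil]
      rw [pvLastMapRange _ _ (by omega)]
      rw [show ((m:Int)) = ((m:Nat):Int) from rfl, PySem.List.pyGetD_natCast]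
      obtain ⟨j, rfl⟩ : ∃ j, m = j + 1 := ⟨m - 1, by omega⟩
      rw [List.range_succ (n := j + 1), List.map_append]
      simp only [Nat.add_sub_cancel, List.map_cons, List.map_nil]
      rw [← pvPref_succ nums j (by omega)]

theorem pvLoopA_eq (nums : List Int) (mb : Int) (n : Nat) (k : Nat) (hk : k ≤ n) :
    pvLoopA mb ((List.range n).map (pvPref nums)) k
    = (List.range k).reverse.map (fun j => PySem.Int.bxor ((2:Int) ^ mb.toNat - 1) (pvPref nums j)) := by
  induction k with
  | zero => simp [pvLoopA]
  | succ j ih =>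
    rw [pvLoopA, ih (by omega)]
    rw [show ((j:Int)) = ((j:Nat):Int) from rfl, PySem.List.pyGetD_natCast,
        PySem.List.getD_map_range _ _ _ _ (by omega)]
    rw [List.range_succ, List.reverse_append]
    simp

theorem pvLoopB_eq (nums : List Int) (mask : Int) (k : Nat) (hk : k < nums.length) :
    pvLoopB mask nums (k+1) (pvPref nums k)
    = (List.range (k+1)).reverse.map (fun j => PySem.Int.bxor mask (pvPref nums j)) := by
  induction k with
  | zero => simp [pvLoopB, List.range_succ]
  | succ j ih =>
    rw [pvLoopB]
    rw [show ((j+1 : Nat):Int) = (((j+1 : Nat)):Int) from rfl, PySem.List.pyGetD_natCast]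
    have hpeel : PySem.Int.bxor (pvPref nums (j+1)) (nums.getD (j+1) 0) = pvPref nums j := by
      rw [pvPref_succ nums j hk, pvBxor_cancel]
    rw [hpeel, ih (by omega)]
    rw [List.range_succ (n := j + 1), List.reverse_append]
    simp

theorem pvTotal_eq (nums : List Int) (hne : nums ≠ []) :
    (PySem.List.slice nums (some 1) none).foldl PySem.Int.bxor (PySem.List.pyGetD nums 0 0)
    = pvPref nums (nums.length - 1) := by
  obtain ⟨x, t, rfl⟩ : ∃ x t, nums = x :: t := by
    cases nums with
    | nil => exact absurd rfl hne
    | cons x t => exact ⟨x, t, rfl⟩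
  rw [PySem.List.slice_from_one]
  rw [show ((0:Int)) = ((0:Nat):Int) from rfl, PySem.List.pyGetD_natCast]
  unfold pvPref
  simp only [List.length_cons, Nat.add_sub_cancel, List.tail_cons, List.getD]
  rw [List.take_of_length_le (by simp), List.foldl_cons, pvBxor_zero_left]
  rfl

theorem pvMask_eq (mb : Int) : (1:Int) <<< mb.toNat - 1 = (2:Int) ^ mb.toNat - 1 := by
  simp [Int.shiftLeft_eq]

-- ===== VERDICT (by name: the statement is the Claim_ definition above) =====
theorem getMaximumXor_spec : Claim_equal_getMaximumXor := by
  intro nums mb _ hpre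
  obtain ⟨hne, _⟩ := hpre
  have hlen : 1 ≤ nums.length := by
    cases nums with
    | nil => exact absurd rfl hne
    | cons x t => simp
  unfold Spec_getMaximumXor getMaximumXor getMaximumXor_alt
  have harr : pvArrA nums = (List.range nums.length).map (pvPref nums) := by
    unfold pvArrA; exact pvArr_eq nums hne nums.length hlen le_rfl
  rw [harr]
  rw [show ((List.range nums.length).map (pvPref nums)).length = nums.length by simp]
  rw [pvLoopA_eq nums mb nums.length nums.length le_rfl]
  rw [pvTotal_eq nums hne, pvMask_eq]
  obtain ⟨m, hm⟩ : ∃ m, nums.length = m + 1 := ⟨nums.length - 1, by omega⟩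
  rw [hm]
  simp only [Nat.add_sub_cancel]
  rw [pvLoopB_eq nums _ m (by omega)]
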